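-- pv_equiv track=rewrite | github.com/NT-me/STL_DAAR | utils.py | reIndexDict
-- ===== SOURCE A (Python) =====
-- def reIndexDict(inputDict : dict) -> dict:
--     res = dict()
--     corresDict = dict()
--     newIndex = 0
--     for e in inputDict:
--         oldIndex = inputDict[e][0]
--         if oldIndex not in corresDict:
--             corresDict[oldIndex] = [newIndex]
--             newIndex += 1
--         res[e] = corresDict[oldIndex]
--     return res
-- ===== SOURCE B (Python) =====
-- def reIndexDict(inputDict : dict) -> dict:
--     # no correspondence table: the new index of a key's old index o is, directly,
--     # the number of DISTINCT head values occurring strictly before o's first occurrence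
--     heads = [v[0] for v in inputDict.values()]
--     return {e: [len(set(heads[:heads.index(inputDict[e][0])]))]
--             for e in inputDict}
-- ===== Notes on version B (the rewrite author's own statement) =====
-- stated objective: alternative
-- what changed: Drops A's correspondence dict and running counter entirely: B computes each key's new index directly as the number of distinct head values strictly before the first occurrence of its own head (len(set(prefix))), trading A's single stateful O(n) loop for a stateless per-key rank computation.
import Mathlib
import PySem

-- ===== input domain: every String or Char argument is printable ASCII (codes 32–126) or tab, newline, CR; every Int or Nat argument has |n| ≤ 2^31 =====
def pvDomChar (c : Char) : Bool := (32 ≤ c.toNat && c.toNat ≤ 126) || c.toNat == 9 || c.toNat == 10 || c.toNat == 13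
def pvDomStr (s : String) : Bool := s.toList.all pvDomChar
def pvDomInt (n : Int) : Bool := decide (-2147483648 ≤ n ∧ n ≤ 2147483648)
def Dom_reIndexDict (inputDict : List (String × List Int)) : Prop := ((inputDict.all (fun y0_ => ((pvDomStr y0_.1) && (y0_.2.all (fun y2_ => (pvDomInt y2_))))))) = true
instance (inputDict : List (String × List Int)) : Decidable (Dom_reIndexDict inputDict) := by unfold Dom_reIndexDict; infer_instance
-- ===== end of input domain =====

-- B drops A's correspondence dict and counter: each key's new index is computed directly as the
-- number of distinct head values strictly before the first occurrence of its own head (alternative, not faster).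


-- ===== PORT A =====
-- one step of A's loop body: look up inputDict[e][0], extend corresDict/newIndex if unseen, set res[e]
def reIndexStepA (st : PySem.Dict String (List Int) × PySem.Dict Int (List Int) × Int)
    (p : String × List Int) : PySem.Dict String (List Int) × PySem.Dict Int (List Int) × Int :=
  let oldIndex := PySem.List.pyGetD p.2 0 0   -- inputDict[e][0]; Pre_ guarantees the value list is nonempty
  let corres := if st.2.1.contains oldIndex then st.2.1 else st.2.1.insert oldIndex [st.2.2]
  let newIndex := if st.2.1.contains oldIndex then st.2.2 else st.2.2 + 1
  (st.1.insert p.1 (corres.getD oldIndex []), corres, newIndex)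

-- under Pre_ the keys are distinct, so iterating the association list's pairs IS iterating the dict's keys
def reIndexDict (inputDict : List (String × List Int)) : List (String × List Int) :=
  (inputDict.foldl reIndexStepA (PySem.Dict.empty, PySem.Dict.empty, 0)).1.items

-- ===== PORT B =====
def reIndexDict_alt (inputDict : List (String × List Int)) : List (String × List Int) :=
  -- heads = [v[0] for v in inputDict.values()]
  let heads := inputDict.map (fun p => PySem.List.pyGetD p.2 0 0)
  -- {e: [len(set(heads[:heads.index(inputDict[e][0])]))] for e in inputDict}
  -- heads.index never raises here: inputDict[e][0] is itself one of the heads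
  inputDict.map (fun p =>
    let o := PySem.List.pyGetD p.2 0 0
    let k := (PySem.List.index? heads o).getD 0
    (p.1, [((PySem.Set.ofList (PySem.List.slice heads none (some (k : Int)))).length : Int)]))

-- ===== PRECONDITION & SPEC =====
-- Pre_ excludes (a) inputs in which some value list has no element, where Python A raises IndexError on inputDict[e][0],
-- and (b) association lists with duplicate keys, which have no single dict reading (first-vs-last value):
-- the ports' first-match convention is claimed for distinct keys only.
def Pre_reIndexDict (inputDict : List (String × List Int)) : Prop :=
  (inputDict.map Prod.fst).Nodup ∧ ∀ p ∈ inputDict, p.2 ≠ []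
instance (inputDict : List (String × List Int)) : Decidable (Pre_reIndexDict inputDict) := by
  unfold Pre_reIndexDict; infer_instance

def pvWitness_reIndexDict : (List (String × List Int)) := [("a", [7]), ("b", [2]), ("c", [7])]

def Spec_reIndexDict (inputDict : List (String × List Int)) (out : List (String × List Int)) : Prop :=
  out = reIndexDict_alt inputDict
instance (inputDict : List (String × List Int)) (out : List (String × List Int)) :
    Decidable (Spec_reIndexDict inputDict out) := by unfold Spec_reIndexDict; infer_instance

-- ===== CLAIM (what is proved, stated in full; the proofs are below) =====
def Claim_equal_reIndexDict : Prop := ∀ (inputDict : List (String × List Int)),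
  Dom_reIndexDict inputDict → Pre_reIndexDict inputDict →
  Spec_reIndexDict inputDict (reIndexDict inputDict)

-- ===== LEMMAS AND PROOFS =====

-- appending new elements to the seen-list does not move an existing element's index
theorem idxOf_update_of_mem (s : List Int) (xs : List Int) (o : Int) (ho : o ∈ s) :
    (PySem.Set.update s xs).idxOf o = s.idxOf o := by
  rw [PySem.Set.update_eq_append_filter]
  exact List.idxOf_append_of_mem ho

-- the bridge between the two algorithms: an element's first-appearance rank in the deduped
-- list equals the number of distinct elements strictly before its first occurrence
theorem rank_eq_prefix_card (l : List Int) (o : Int) (k : Nat)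
    (h : PySem.List.index? l o = some k) :
    ((PySem.Set.ofList l).idxOf o : Int) = ((PySem.Set.ofList (l.take k)).length : Int) := by
  obtain ⟨pre, suf, rfl, rfl, hpre⟩ := (PySem.List.index?_eq_some_iff l o k).1 h
  rw [List.take_left]
  have hnot : o ∉ PySem.Set.ofList pre := fun hmem => hpre ((PySem.Set.mem_ofList pre o).1 hmem)
  rw [PySem.Set.ofList_append, PySem.Set.update_cons, PySem.Set.add_of_not_mem hnot,
      PySem.Set.update_eq_append_filter,
      List.idxOf_append_of_mem (by simp), List.idxOf_append_of_notMem hnot,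
      List.idxOf_cons_self]
  simp

-- invariant-carrying description of A's loop
theorem A_items (l : List (String × List Int)) :
    ∀ (res : PySem.Dict String (List Int)) (cd : PySem.Dict Int (List Int)) (order : List Int),
    order.Nodup →
    (∀ o, cd.contains o = decide (o ∈ order)) →
    (∀ o ∈ order, cd.getD o [] = [(order.idxOf o : Int)]) →
    (∀ p ∈ l, res.contains p.1 = false) →
    (l.map Prod.fst).Nodup →
    (l.foldl reIndexStepA (res, cd, (order.length : Int))).1.items
      = res.items ++ l.map (fun p => (p.1,
          [((PySem.Set.update order (l.map (fun p => PySem.List.pyGetD p.2 0 0))).idxOf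
              (PySem.List.pyGetD p.2 0 0) : Int)])) := by
  induction l with
  | nil => intro res cd order _ _ _ _ _; simp
  | cons p l ih =>
      intro res cd order hnd hc hg hres hkeys
      simp only [List.foldl_cons, List.map_cons]
      set o := PySem.List.pyGetD p.2 0 0 with ho
      have hstep : reIndexStepA (res, cd, (order.length : Int)) p
          = (res.insert p.1 ((if cd.contains o then cd else cd.insert o [(order.length : Int)]).getD o []),
             (if cd.contains o then cd else cd.insert o [(order.length : Int)]),
             (if cd.contains o then (order.length : Int) else (order.length : Int) + 1)) := rfl
      have hresP : res.contains p.1 = false := hres p List.mem_cons_self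
      have hres' : ∀ w, ∀ q ∈ l, (res.insert p.1 w).contains q.1 = false := by
        intro w q hq
        rw [PySem.Dict.contains_insert]
        have : q.1 ≠ p.1 := by
          intro h
          exact (List.nodup_cons.1 hkeys).1 (h ▸ List.mem_map_of_mem (f := Prod.fst) hq)
        simp [this, hres q (List.mem_cons_of_mem _ hq)]
      have hsu : PySem.Set.update order (o :: l.map (fun p => PySem.List.pyGetD p.2 0 0))
          = PySem.Set.update (PySem.Set.add order o) (l.map (fun p => PySem.List.pyGetD p.2 0 0)) :=
        PySem.Set.update_cons ..
      by_cases hco : o ∈ order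
      · have hcb : cd.contains o = true := by rw [hc]; simp [hco]
        rw [hstep]; simp only [hcb, if_true]
        rw [ih (res.insert p.1 (cd.getD o [])) cd order hnd hc hg (hres' _) (List.nodup_cons.1 hkeys).2]
        rw [PySem.Dict.items_insert_of_not_contains res _ hresP]
        rw [hg o hco, hsu, PySem.Set.add_of_mem hco,
            idxOf_update_of_mem _ _ _ hco]
        simp
      · have hcb : cd.contains o = false := by rw [hc]; simp [hco]
        rw [hstep]; simp only [hcb, if_false, Bool.false_eq_true]
        have hnd' : (order ++ [o]).Nodup := by
          simp only [List.nodup_append, hnd, true_and]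
          refine ⟨by simp, ?_⟩
          intro a ha b hb
          rw [List.mem_singleton] at hb
          subst hb
          exact fun h => hco (h ▸ ha)
        have hc' : ∀ o', (cd.insert o [(order.length : Int)]).contains o'
            = decide (o' ∈ order ++ [o]) := by
          intro o'
          rw [PySem.Dict.contains_insert, hc]
          by_cases h : o' = o <;> simp [h]
        have hidxo : (order ++ [o]).idxOf o = order.length := by
          rw [List.idxOf_append_of_notMem hco, List.idxOf_cons_self]
          omega
        have hg' : ∀ o' ∈ order ++ [o], (cd.insert o [(order.length : Int)]).getD o' []
            = [((order ++ [o]).idxOf o' : Int)] := by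
          intro o' ho'
          rw [PySem.Dict.getD_insert]
          by_cases h : o' = o
          · subst h; rw [hidxo]; simp
          · have hmem : o' ∈ order := by
              rcases List.mem_append.1 ho' with h1 | h1
              · exact h1
              · exact absurd (List.mem_singleton.1 h1) h
            rw [if_neg h, hg o' hmem, List.idxOf_append_of_mem hmem]
        have hlen : ((order ++ [o]).length : Int) = (order.length : Int) + 1 := by
          simp
        have := ih (res.insert p.1 ((cd.insert o [(order.length : Int)]).getD o []))
            (cd.insert o [(order.length : Int)]) (order ++ [o]) hnd' hc' hg' (hres' _)
            (List.nodup_cons.1 hkeys).2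
        rw [hlen] at this
        rw [this]
        rw [PySem.Dict.items_insert_of_not_contains res _ hresP,
            PySem.Dict.getD_insert_self]
        rw [hsu, PySem.Set.add_of_not_mem hco]
        have hfirst : (PySem.Set.update (order ++ [o])
            (l.map (fun p => PySem.List.pyGetD p.2 0 0))).idxOf o = order.length := by
          rw [idxOf_update_of_mem _ _ _ (by simp), hidxo]
        rw [hfirst]
        simp

-- ===== VERDICT (by name: the statement is the Claim_ definition above) =====
theorem reIndexDict_spec : Claim_equal_reIndexDict := by
  intro l _ hpre
  unfold Spec_reIndexDict reIndexDict reIndexDict_alt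
  have h0 : (0 : Int) = (([] : List Int).length : Int) := by simp
  conv_lhs => rw [h0, A_items l PySem.Dict.empty PySem.Dict.empty []
        List.nodup_nil
        (by intro o; simp [PySem.Dict.contains_empty])
        (by intro o ho; cases ho)
        (by intro q _; exact PySem.Dict.contains_empty _)
        hpre.1,
      PySem.Set.update_nil_left]
  have hie : (PySem.Dict.empty : PySem.Dict String (List Int)).items = [] := rfl
  rw [hie, List.nil_append]
  apply List.map_congr_left
  intro p hp
  have hmem : PySem.List.pyGetD p.2 0 0
      ∈ l.map (fun p => PySem.List.pyGetD p.2 0 0) := List.mem_map_of_mem hp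
  obtain ⟨k, hk⟩ := Option.isSome_iff_exists.1
      ((PySem.List.index?_isSome_iff _ _).2 hmem)
  dsimp only
  rw [hk]
  simp only [Option.getD_some]
  rw [PySem.List.slice_to_natCast]
  rw [rank_eq_prefix_card _ _ _ hk]
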